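-- pv_equiv track=rewrite | github.com/AllAlgorithms/python | algorithms/cryptography/playfair.py | normalizeMessage
-- ===== SOURCE A (Python) =====
-- def normalizeMessage(text):
--     newText = []
--     text = text.upper()
--     text = text.replace(" ", "")
--     text = text.replace(".", "")
--     text = text.replace(",", "")
--     pos = 0
--     while pos < len(text) - 1:
--         firstLetter = text[pos]
--         secondLetter = text[pos + 1]
--         if firstLetter == secondLetter:
--             if firstLetter == "X":
--                 newText.append(firstLetter)
--                 newText.append("Z")
--                 pos += 1
--             else:
--                 newText.append(firstLetter)
--                 newText.append("X")
--                 pos += 1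
--         else:
--             newText.append(firstLetter)
--             newText.append(secondLetter)
--             pos += 2
--     if pos < len(text):
--         if text[-1] == "X":
--             newText.append(text[pos])
--             newText.append("Z")
--         else:
--             newText.append(text[pos])
--             newText.append("X")
--     return newText
-- ===== SOURCE B (Python) =====
-- def normalizeMessage(text):
--     text = text.upper().replace(" ", "").replace(".", "").replace(",", "")
--     newText = []
--     pending = None
--     for c in text:
--         if pending is None:
--             pending = c
--         elif pending == c:
--             newText.append(pending)
--             newText.append("Z" if pending == "X" else "X")
--             pending = c
--         else:
--             newText.append(pending)
--             newText.append(c)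
--             pending = None
--     if pending is not None:
--         newText.append(pending)
--         newText.append("Z" if pending == "X" else "X")
--     return newText
-- ===== Notes on version B (the rewrite author's own statement) =====
-- stated objective: alternative
-- what changed: Replaced the index-jumping while loop (lookahead text[pos]/text[pos+1], pos advancing by 1 or 2, plus a separate tail check on text[-1]) with a single for-loop over the characters that carries a `pending` letter and flushes pairs as it goes.
import Mathlib
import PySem

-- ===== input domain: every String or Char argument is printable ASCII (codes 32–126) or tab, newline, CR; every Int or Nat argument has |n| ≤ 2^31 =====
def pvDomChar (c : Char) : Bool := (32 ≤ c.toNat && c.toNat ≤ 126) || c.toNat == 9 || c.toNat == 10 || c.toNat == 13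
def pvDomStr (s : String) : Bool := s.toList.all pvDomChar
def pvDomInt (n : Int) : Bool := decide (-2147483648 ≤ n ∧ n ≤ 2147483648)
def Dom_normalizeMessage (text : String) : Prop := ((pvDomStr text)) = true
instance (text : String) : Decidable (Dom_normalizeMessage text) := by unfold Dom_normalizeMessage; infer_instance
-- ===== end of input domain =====

-- B replaces A's index-jumping while loop (lookahead, pos += 1 or 2) by a single
-- for-loop over the characters carrying a `pending` letter; same output (objective: alternative).

-- ===== PORT A =====
-- shared preprocessing: text.upper().replace(" ","").replace(".","").replace(",","")
def pvPre (text : String) : List Char :=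
  PySem.Chars.replace
    (PySem.Chars.replace
      (PySem.Chars.replace (PySem.Chars.upper text.toList) [' '] [])
      ['.'] [])
    [','] []

-- A's while loop over the index pos (text[pos], text[pos+1], text[-1])
def pvALoop (cs : List Char) (pos : Nat) : List String :=
  if pos + 1 < cs.length then
    let firstLetter := cs.getD pos ' '
    let secondLetter := cs.getD (pos + 1) ' '
    if firstLetter = secondLetter then
      if firstLetter = 'X' then
        firstLetter.toString :: "Z" :: pvALoop cs (pos + 1)
      else
        firstLetter.toString :: "X" :: pvALoop cs (pos + 1)
    else
      firstLetter.toString :: secondLetter.toString :: pvALoop cs (pos + 2)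
  else if pos < cs.length then
    if cs.getD (cs.length - 1) ' ' = 'X' then
      [(cs.getD pos ' ').toString, "Z"]
    else
      [(cs.getD pos ' ').toString, "X"]
  else []
termination_by cs.length - pos

def normalizeMessage (text : String) : List String :=
  pvALoop (pvPre text) 0

-- ===== PORT B =====
def pvFiller (p : Char) : String := if p = 'X' then "Z" else "X"

-- B's for-loop with the `pending` carry
def pvBLoop (cs : List Char) (pending : Option Char) : List String :=
  match cs, pending with
  | [], none => []
  | [], some p => [p.toString, pvFiller p]
  | c :: rest, none => pvBLoop rest (some c)
  | c :: rest, some p =>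
    if p = c then p.toString :: pvFiller p :: pvBLoop rest (some c)
    else p.toString :: c.toString :: pvBLoop rest none

def normalizeMessage_alt (text : String) : List String :=
  pvBLoop (pvPre text) none

-- ===== PRECONDITION & SPEC =====
def Spec_normalizeMessage (text : String) (out : List String) : Prop := out = normalizeMessage_alt text
instance (text : String) (out : List String) : Decidable (Spec_normalizeMessage text out) := by unfold Spec_normalizeMessage; infer_instance

-- ===== CLAIM (what is proved, stated in full; the proofs are below) =====
def Claim_equal_normalizeMessage : Prop := ∀ (text : String), Dom_normalizeMessage text → Spec_normalizeMessage text (normalizeMessage text)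

-- ===== LEMMAS AND PROOFS =====

lemma pvLoop_eq_aux : ∀ (n : Nat) (cs : List Char) (pos : Nat), cs.length - pos ≤ n →
    pvALoop cs pos = pvBLoop (cs.drop pos) none := by
  intro n
  induction n with
  | zero =>
    intro cs pos h
    have hlen : cs.length ≤ pos := by omega
    rw [pvALoop, if_neg (by omega), if_neg (by omega)]
    simp [List.drop_eq_nil_of_le hlen, pvBLoop]
  | succ n ih =>
    intro cs pos h
    rw [pvALoop]
    by_cases h1 : pos + 1 < cs.length
    · have hp : pos < cs.length := by omega
      have hdrop : cs.drop pos = cs[pos] :: cs.drop (pos + 1) := List.drop_eq_getElem_cons hp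
      have hdrop2 : cs.drop (pos + 1) = cs[pos+1] :: cs.drop (pos + 2) := List.drop_eq_getElem_cons h1
      have hg1 : cs.getD pos ' ' = cs[pos] := List.getD_eq_getElem cs ' ' hp
      have hg2 : cs.getD (pos+1) ' ' = cs[pos+1] := List.getD_eq_getElem cs ' ' h1
      rw [hdrop, hdrop2]
      simp only [if_pos h1, hg1, hg2, pvBLoop]
      by_cases heq : cs[pos] = cs[pos+1]
      · have ihr := ih cs (pos + 1) (by omega)
        rw [hdrop2] at ihr
        simp only [heq]
        by_cases hx : cs[pos+1] = 'X'
        · simp [hx, pvFiller, ihr, pvBLoop]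
        · simp [hx, pvFiller, ihr, pvBLoop]
      · have ihr := ih cs (pos + 2) (by omega)
        simp [heq, ihr]
    · by_cases h2 : pos < cs.length
      · have hpos : pos = cs.length - 1 := by omega
        have hdrop : cs.drop pos = cs[pos] :: cs.drop (pos + 1) := List.drop_eq_getElem_cons h2
        have hnil : cs.drop (pos + 1) = [] := List.drop_eq_nil_of_le (by omega)
        have hg1 : cs.getD pos ' ' = cs[pos] := List.getD_eq_getElem cs ' ' h2
        have hg2 : cs.getD (cs.length - 1) ' ' = cs[pos] := by rw [← hpos]; exact hg1
        rw [hdrop, hnil]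
        simp only [if_neg h1, if_pos h2, hg1, hg2, pvBLoop, pvFiller]
        by_cases hx : cs[pos] = 'X' <;> simp [hx]
      · have hlen : cs.length ≤ pos := by omega
        simp [if_neg h1, if_neg h2, List.drop_eq_nil_of_le hlen, pvBLoop]

lemma pvLoop_eq (cs : List Char) : pvALoop cs 0 = pvBLoop cs none := by
  have := pvLoop_eq_aux (cs.length) cs 0 (by omega)
  simpa using this

-- ===== VERDICT (by name: the statement is the Claim_ definition above) =====
theorem normalizeMessage_spec : Claim_equal_normalizeMessage := by
  intro text _
  unfold Spec_normalizeMessage normalizeMessage normalizeMessage_alt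
  exact pvLoop_eq (pvPre text)
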